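-- pv_equiv track=rewrite | github.com/ashkan0201/Test_app | src/for_testing.py | find
-- ===== SOURCE A (Python) =====
-- def find(str1, str2):
--     try:
--         char = [
--             "-",
--             "?",
--             "(",
--             ")",
--             ">",
--             "<",
--             ".",
--             ",",
--             "!",
--             "@",
--             "#",
--             "$",
--             "%",
--             "^",
--             "&",
--             "*",
--             "=",
--             "+",
--             "_",
--             "]",
--             "[",
--             "{",
--             "}",
--             "|",
--             "'",
--             "/",
--         ]
--         for i in char:
--             str1 = str1.replace(i," ")
--         findall1 = str1.split()
--     except:
--         "i wana 2 string"
--     else: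
--         if str2 in findall1:
--             return True
--         else:
--             return(False)
-- ===== SOURCE B (Python) =====
-- def find(str1, str2):
--     delims = set("-?()><.,!@#$%^&*=+_][{}|'/")
--     token = ""
--     for c in str1:
--         if c in delims or c.isspace():
--             if token != "" and token == str2:
--                 return True
--             token = ""
--         else:
--             token += c
--     return token != "" and token == str2
-- ===== Notes on version B (the rewrite author's own statement) =====
-- stated objective: alternative
-- what changed: B replaces A's 26 full-string replace passes followed by split and list membership with a single left-to-right scan that accumulates the current token and compares each completed token to str2 directly, returning early on the first match.
import Mathlib
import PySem

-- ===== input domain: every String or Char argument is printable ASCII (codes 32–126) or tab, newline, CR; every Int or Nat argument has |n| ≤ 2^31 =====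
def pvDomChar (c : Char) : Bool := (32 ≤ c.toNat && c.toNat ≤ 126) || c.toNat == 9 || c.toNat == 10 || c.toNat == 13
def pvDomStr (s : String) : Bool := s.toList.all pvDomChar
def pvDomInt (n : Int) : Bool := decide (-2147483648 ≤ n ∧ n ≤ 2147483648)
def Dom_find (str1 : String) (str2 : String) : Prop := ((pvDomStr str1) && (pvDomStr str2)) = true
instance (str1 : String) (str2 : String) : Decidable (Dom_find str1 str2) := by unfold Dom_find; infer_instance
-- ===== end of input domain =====

-- B replaces A's 26 replace passes + split + membership by a single left-to-right token scan
-- with early return (objective: alternative — a genuinely different traversal, similar cost).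

-- ===== PORT A =====
-- A: replace each special character by a space, split on whitespace, test membership.
-- (A's bare `except` can only fire for non-string arguments, which are outside the type convention;
-- on String inputs A always returns a Bool, so the port is total and no Pre_ is needed.)
def find (str1 : String) (str2 : String) : Bool :=
  let char : List String :=
    ["-", "?", "(", ")", ">", "<", ".", ",", "!", "@", "#", "$", "%", "^", "&",
     "*", "=", "+", "_", "]", "[", "{", "}", "|", "'", "/"]
  let str1 := char.foldl (fun s i => PySem.Str.replace s i " ") str1
  let findall1 := PySem.Str.split₀ str1
  decide (str2 ∈ findall1)

-- ===== PORT B =====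
-- B's delimiter set: set("-?()><.,!@#$%^&*=+_][{}|'/")
def pvAltDelims : PySem.Set Char := PySem.Set.ofList ("-?()><.,!@#$%^&*=+_][{}|'/".toList)

-- B's loop: accumulate the current token; on a delimiter/whitespace, compare the completed token.
def findAltGo (t : List Char) : List Char → List Char → Bool
  | [], tok => decide (tok ≠ []) && (tok == t)
  | c :: cs, tok =>
      if PySem.Set.contains pvAltDelims c || PySem.Chars.isspace c then
        (if decide (tok ≠ []) && (tok == t) then true else findAltGo t cs [])
      else findAltGo t cs (tok ++ [c])

def find_alt (str1 : String) (str2 : String) : Bool :=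
  findAltGo str2.toList str1.toList []

-- ===== PRECONDITION & SPEC =====
def Spec_find (str1 : String) (str2 : String) (out : Bool) : Prop := out = find_alt str1 str2
instance (str1 : String) (str2 : String) (out : Bool) : Decidable (Spec_find str1 str2 out) := by unfold Spec_find; infer_instance

-- ===== CLAIM (what is proved, stated in full; the proofs are below) =====
def Claim_equal_find : Prop := ∀ (str1 : String) (str2 : String), Dom_find str1 str2 → Spec_find str1 str2 (find str1 str2)

-- ===== LEMMAS AND PROOFS =====

-- A's delimiter characters, as a Char list.
def pvDelimChars : List Char :=
  ['-', '?', '(', ')', '>', '<', '.', ',', '!', '@', '#', '$', '%', '^', '&',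
   '*', '=', '+', '_', ']', '[', '{', '}', '|', '\'', '/']

-- the substitution a full replace pass over the delimiter list performs
def pvSubst (ds : List Char) (c : Char) : Char := if c ∈ ds then ' ' else c

-- replacing a single-character pattern by a single character is a character map
lemma replace_go_single (d e : Char) : ∀ (fuel : Nat) (l acc : List Char), l.length ≤ fuel →
    PySem.Chars.replace.go [d] [e] fuel l acc
      = acc.reverse ++ l.map (fun c => if c = d then e else c) := by
  intro fuel
  induction fuel with
  | zero =>
    intro l acc h
    cases l with
    | nil => simp [PySem.Chars.replace.go]
    | cons c t => simp at h
  | succ n ih =>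
    intro l acc h
    cases l with
    | nil => simp [PySem.Chars.replace.go]
    | cons c t =>
      rw [PySem.Chars.replace.go]
      simp only [List.isPrefixOf, Bool.and_true]
      have hlen : t.length ≤ n := Nat.le_of_succ_le_succ (by simpa using h)
      by_cases hc : c = d
      · subst hc
        simp only [beq_self_eq_true, if_true, List.drop_succ_cons, List.drop_zero, List.length_cons, List.length_nil]
        rw [ih t ([e].reverse ++ acc) hlen]
        simp
      · have hbc : (d == c) = false := beq_eq_false_iff_ne.mpr (fun h' => hc h'.symm)
        rw [hbc]
        simp only [Bool.false_eq_true, if_false]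
        rw [ih t (c :: acc) hlen]
        rw [List.map_cons, List.reverse_cons, List.append_assoc]
        simp [hc]

lemma replace_single (d e : Char) (s : List Char) :
    PySem.Chars.replace s [d] [e] = s.map (fun c => if c = d then e else c) := by
  rw [PySem.Chars.replace]
  simp only [List.isEmpty_cons, Bool.false_eq_true, if_false]
  rw [replace_go_single d e s.length s [] (le_refl _)]
  simp

-- the string-level fold of A equals the char-level fold
lemma fold_toList : ∀ (ds : List String) (s : String),
    (ds.foldl (fun s i => PySem.Str.replace s i " ") s).toList
      = (ds.map String.toList).foldl (fun s d => PySem.Chars.replace s d [' ']) s.toList := by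
  intro ds
  induction ds with
  | nil => intro s; rfl
  | cons d ds ih =>
    intro s
    rw [List.foldl_cons, List.map_cons, List.foldl_cons, ih]
    congr 1
    have hsp : (" " : String).toList = [' '] := rfl
    rw [← hsp, PySem.Str.toList_replace]

-- folding single-char replaces is one map, provided ' ' is never a delimiter
lemma fold_single_replace : ∀ (ds : List Char) (s : List Char), ' ' ∉ ds →
    ((ds.map (fun d => [d])).foldl (fun s d => PySem.Chars.replace s d [' ']) s)
      = s.map (pvSubst ds) := by
  intro ds
  induction ds with
  | nil =>
    intro s _
    have h0 : pvSubst [] = id := by funext c; simp [pvSubst]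
    rw [h0, List.map_id]
    rfl
  | cons d ds ih =>
    intro s h
    rw [List.map_cons, List.foldl_cons, replace_single,
        ih _ (fun hm => h (List.mem_cons_of_mem _ hm)), List.map_map]
    apply List.map_congr_left
    intro c _
    simp only [Function.comp_apply, pvSubst]
    by_cases hc : c = d
    · subst hc
      have hns : ' ' ∉ ds := fun hm => h (List.mem_cons_of_mem _ hm)
      simp [pvSubst, hns]
    · simp [pvSubst, hc]

lemma delims_eq : pvAltDelims = pvDelimChars := by decide

-- separator test agreement: a char is blanked-or-space iff B treats it as a separator
lemma sep_agree (c : Char) :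
    PySem.Chars.isspace (pvSubst pvDelimChars c)
      = (PySem.Set.contains pvAltDelims c || PySem.Chars.isspace c) := by
  rw [delims_eq]
  by_cases hc : c ∈ pvDelimChars
  · have h1 : PySem.Set.contains pvDelimChars c = true := by
      simp only [PySem.Set.contains]
      exact List.contains_iff_mem.mpr hc
    have h2 : pvSubst pvDelimChars c = ' ' := by simp [pvSubst, hc]
    rw [h1, h2, Bool.true_or]
    decide
  · have h1 : PySem.Set.contains pvDelimChars c = false := by
      simp only [PySem.Set.contains]
      exact Bool.eq_false_iff.mpr (fun hh => hc (List.contains_iff_mem.mp hh))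
    have h2 : pvSubst pvDelimChars c = c := by simp [pvSubst, hc]
    rw [h1, h2, Bool.false_or]

-- the core correspondence: split₀.go on the blanked string vs B's scan
lemma go_mem (t : List Char) : ∀ (s tok : List Char) (acc : List (List Char)),
    (t ∈ PySem.Chars.split₀.go (s.map (pvSubst pvDelimChars)) tok.reverse acc)
      ↔ (t ∈ acc ∨ findAltGo t s tok = true) := by
  intro s
  induction s with
  | nil =>
    intro tok acc
    cases tok with
    | nil =>
      simp [PySem.Chars.split₀.go, findAltGo]
    | cons x xs =>
      rw [List.map_nil, PySem.Chars.split₀.go]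
      have hne : ((x :: xs : List Char).reverse.isEmpty) = false := by simp
      rw [hne]
      simp only [Bool.false_eq_true, if_false, List.reverse_reverse, findAltGo]
      by_cases ht : (x :: xs) = t
      · subst ht
        simp
      · have ht' : t ≠ x :: xs := fun hh => ht hh.symm
        have hbt : ((x :: xs : List Char) == t) = false := by simpa using ht
        simp [hbt, ht']
  | cons c rest ih =>
    intro tok acc
    rw [List.map_cons, PySem.Chars.split₀.go, sep_agree, findAltGo]
    cases hcond : (PySem.Set.contains pvAltDelims c || PySem.Chars.isspace c) with
    | true =>
      simp only [if_true]
      cases tok with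
      | nil =>
        simp only [List.reverse_nil, List.isEmpty_nil, if_true]
        have hd : (decide ((([] : List Char)) ≠ []) && (([] : List Char) == t)) = false := by
          simp
        rw [hd]
        simp only [Bool.false_eq_true, if_false]
        have hih := ih [] acc
        simpa using hih
      | cons x xs =>
        have hne : ((x :: xs : List Char).reverse.isEmpty) = false := by simp
        rw [hne]
        simp only [Bool.false_eq_true, if_false, List.reverse_reverse]
        have hih := ih [] ((x :: xs) :: acc)
        simp only [List.reverse_nil] at hih
        rw [hih]
        by_cases ht : (x :: xs) = t
        · subst ht
          simp
        · have ht' : t ≠ x :: xs := fun hh => ht hh.symm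
          have hbt : ((x :: xs : List Char) == t) = false := by simpa using ht
          simp only [hbt, Bool.and_false, Bool.false_eq_true, if_false, List.mem_cons]
          constructor
          · rintro ((h | h) | h)
            · exact absurd h ht'
            · exact Or.inl h
            · exact Or.inr h
          · rintro (h | h)
            · exact Or.inl (Or.inr h)
            · exact Or.inr h
    | false =>
      simp only [Bool.false_eq_true, if_false]
      have hfc : pvSubst pvDelimChars c = c := by
        have hmem : c ∉ pvDelimChars := by
          intro hm
          have : PySem.Set.contains pvAltDelims c = true := by
            rw [delims_eq]
            simp only [PySem.Set.contains]
            exact List.contains_iff_mem.mpr hm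
          rw [this, Bool.true_or] at hcond
          exact absurd hcond (by decide)
        simp [pvSubst, hmem]
      rw [hfc]
      have h3 : c :: tok.reverse = (tok ++ [c]).reverse := by simp
      rw [h3, ih (tok ++ [c]) acc]

-- ===== VERDICT (by name: the statement is the Claim_ definition above) =====
theorem find_spec : Claim_equal_find := by
  intro str1 str2 _
  unfold Spec_find find find_alt
  have hinj : Function.Injective String.toList := by
    intro a b h
    have := congrArg String.ofList h
    simpa using this
  have hmaps : (["-", "?", "(", ")", ">", "<", ".", ",", "!", "@", "#", "$", "%", "^", "&",
      "*", "=", "+", "_", "]", "[", "{", "}", "|", "'", "/"] : List String).map String.toList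
      = pvDelimChars.map (fun d => [d]) := by decide
  have h1 : ((["-", "?", "(", ")", ">", "<", ".", ",", "!", "@", "#", "$", "%", "^", "&",
      "*", "=", "+", "_", "]", "[", "{", "}", "|", "'", "/"] : List String).foldl
      (fun s i => PySem.Str.replace s i " ") str1).toList
      = str1.toList.map (pvSubst pvDelimChars) := by
    rw [fold_toList, hmaps, fold_single_replace _ _ (by decide)]
  have key : (str2 ∈ PySem.Str.split₀ ((["-", "?", "(", ")", ">", "<", ".", ",", "!", "@",
      "#", "$", "%", "^", "&", "*", "=", "+", "_", "]", "[", "{", "}", "|", "'", "/"] :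
      List String).foldl (fun s i => PySem.Str.replace s i " ") str1))
      ↔ findAltGo str2.toList str1.toList [] = true := by
    rw [show ∀ (L : List String), (str2 ∈ L ↔ str2.toList ∈ L.map String.toList) from
      fun L => (List.mem_map_of_injective hinj).symm]
    rw [PySem.Str.split₀_map_toList, h1]
    have hgo : PySem.Chars.split₀ (str1.toList.map (pvSubst pvDelimChars))
        = PySem.Chars.split₀.go (str1.toList.map (pvSubst pvDelimChars))
            (List.reverse []) [] := rfl
    rw [hgo, go_mem str2.toList str1.toList [] []]
    simp
  by_cases h : (str2 ∈ PySem.Str.split₀ ((["-", "?", "(", ")", ">", "<", ".", ",", "!", "@",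
      "#", "$", "%", "^", "&", "*", "=", "+", "_", "]", "[", "{", "}", "|", "'", "/"] :
      List String).foldl (fun s i => PySem.Str.replace s i " ") str1))
  · rw [decide_eq_true h, key.mp h]
  · have h2 : findAltGo str2.toList str1.toList [] = false := by
      rw [← Bool.not_eq_true]
      exact fun hh => h (key.mpr hh)
    rw [decide_eq_false h, h2]
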